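-- pv_equiv track=rewrite | github.com/AfricanRunner/advent-of-code | 2023/11_cosmic_expansion/part2.py | get_distances
-- ===== SOURCE A (Python) =====
-- def get_distances(empty_spaces: list[bool]) -> list[int]:
--     distances = []
--     total = 0
--     for is_empty in empty_spaces:
--         if is_empty:
--             total += (1000000 - 1)
--         distances.append(total)
--         total += 1
--     return distances
-- ===== SOURCE B (Python) =====
-- def get_distances(empty_spaces: list[bool]) -> list[int]:
--     # Divide and conquer: solve(seg) returns the distances within seg (measured from
--     # seg's start) together with seg's total expanded width; merging shifts the whole
--     # right half once by the left half's width.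
--     def solve(seg):
--         if not seg:
--             return [], 0
--         if len(seg) == 1:
--             w = 1000000 if seg[0] else 1
--             return [w - 1], w
--         m = len(seg) // 2
--         left, wl = solve(seg[:m])
--         right, wr = solve(seg[m:])
--         return left + [d + wl for d in right], wl + wr
--     return solve(empty_spaces)[0]
-- ===== Notes on version B (the rewrite author's own statement) =====
-- stated objective: alternative
-- what changed: B is divide-and-conquer: it recursively solves the two halves of the list (each segment yielding its local distances and its total expanded width) and merges by shifting the right half's distances once by the left half's width, instead of A's single left-to-right scan with a running total.
import Mathlib
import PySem

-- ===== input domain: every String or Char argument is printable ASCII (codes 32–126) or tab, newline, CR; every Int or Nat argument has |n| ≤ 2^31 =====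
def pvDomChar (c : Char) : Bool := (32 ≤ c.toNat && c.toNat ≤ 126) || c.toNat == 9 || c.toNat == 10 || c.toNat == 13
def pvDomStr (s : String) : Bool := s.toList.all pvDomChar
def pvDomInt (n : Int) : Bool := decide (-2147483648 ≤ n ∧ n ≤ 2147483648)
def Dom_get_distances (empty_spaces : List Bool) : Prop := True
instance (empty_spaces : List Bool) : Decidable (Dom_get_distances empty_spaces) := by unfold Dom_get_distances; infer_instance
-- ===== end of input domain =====

-- B replaces A's left-to-right running-total scan by divide and conquer: solve each half,
-- then shift the right half once by the left half's total expanded width (alternative).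

-- ===== PORT A =====
def get_distances (empty_spaces : List Bool) : List Int :=
  (empty_spaces.foldl
    (fun (st : List Int × Int) is_empty =>
      let total := if is_empty then st.2 + (1000000 - 1) else st.2
      (st.1 ++ [total], total + 1))
    ([], 0)).1

-- ===== PORT B =====
-- helper `solve` of Source B; `seg[:m]`/`seg[m:]` with 0 ≤ m ≤ len(seg) are exactly take/drop
def pvSolve : List Bool → List Int × Int
  | [] => ([], 0)
  | [e] =>
      let w : Int := if e then 1000000 else 1
      ([w - 1], w)
  | a :: b :: rest =>
      let seg := a :: b :: rest
      let m := seg.length / 2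
      let L := pvSolve (seg.take m)
      let R := pvSolve (seg.drop m)
      (L.1 ++ R.1.map (fun d => d + L.2), L.2 + R.2)
termination_by seg => seg.length
decreasing_by
  · simp; omega
  · simp; omega

def get_distances_alt (empty_spaces : List Bool) : List Int :=
  (pvSolve empty_spaces).1

-- ===== PRECONDITION & SPEC =====
def Spec_get_distances (empty_spaces : List Bool) (out : List Int) : Prop := out = get_distances_alt empty_spaces
instance (empty_spaces : List Bool) (out : List Int) : Decidable (Spec_get_distances empty_spaces out) := by unfold Spec_get_distances; infer_instance

-- ===== CLAIM (what is proved, stated in full; the proofs are below) =====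
def Claim_equal_get_distances : Prop := ∀ (empty_spaces : List Bool), Dom_get_distances empty_spaces → Spec_get_distances empty_spaces (get_distances empty_spaces)

-- ===== LEMMAS AND PROOFS =====

/-- functional form of A's loop body starting from running total `t` -/
def pvFA : List Bool → Int → List Int
  | [], _ => []
  | e :: r, t =>
      let t' := if e then t + 999999 else t
      t' :: pvFA r (t' + 1)

/-- total expanded width of a segment -/
def pvW : List Bool → Int
  | [] => 0
  | e :: r => (if e then 1000000 else 1) + pvW r

theorem pvA_fold (xs : List Bool) : ∀ (d : List Int) (t : Int),
    (xs.foldl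
      (fun (st : List Int × Int) is_empty =>
        let total := if is_empty then st.2 + (1000000 - 1) else st.2
        (st.1 ++ [total], total + 1))
      (d, t)).1 = d ++ pvFA xs t := by
  induction xs with
  | nil => intro d t; simp [pvFA]
  | cons e r ih =>
      intro d t
      simp only [List.foldl_cons, pvFA, ih]
      by_cases he : e <;> simp [he]

theorem pv_shift (xs : List Bool) : ∀ (t : Int),
    pvFA xs t = (pvFA xs 0).map (fun d => d + t) := by
  induction xs with
  | nil => intro t; simp [pvFA]
  | cons e r ih =>
      intro t
      simp only [pvFA, List.map_cons]
      refine List.cons.injEq .. ▸ ⟨by cases e <;> simp <;> ring, ?_⟩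
      rw [ih, ih (_ + 1), List.map_map]
      apply List.map_congr_left
      intro d _
      cases e <;> simp <;> omega

theorem pvW_append (l r : List Bool) : pvW (l ++ r) = pvW l + pvW r := by
  induction l with
  | nil => simp [pvW]
  | cons e l' ih => simp [pvW, ih]; ring

theorem pvFA_append (l : List Bool) : ∀ (r : List Bool) (t : Int),
    pvFA (l ++ r) t = pvFA l t ++ pvFA r (t + pvW l) := by
  induction l with
  | nil => intro r t; simp [pvFA, pvW]
  | cons e l' ih =>
      intro r t
      simp only [List.cons_append, pvFA, ih, pvW, List.cons_append]
      refine List.cons.injEq .. ▸ ⟨rfl, ?_⟩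
      congr 1
      cases e <;> simp <;> congr 1 <;> ring

theorem pv_main : ∀ (n : Nat) (seg : List Bool), seg.length ≤ n →
    pvSolve seg = (pvFA seg 0, pvW seg) := by
  intro n
  induction n with
  | zero =>
      intro seg h
      have : seg = [] := List.eq_nil_of_length_eq_zero (Nat.le_zero.mp h)
      subst this; simp [pvSolve, pvFA, pvW]
  | succ k ih =>
      intro seg h
      match seg with
      | [] => simp [pvSolve, pvFA, pvW]
      | [e] => cases e <;> simp [pvSolve, pvFA, pvW]
      | a :: b :: rest =>
          rw [pvSolve]
          have hlen : (a :: b :: rest).length = rest.length + 2 := by simp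
          set s := a :: b :: rest with hs
          have hm1 : 1 ≤ s.length / 2 := by rw [hlen]; omega
          have hm2 : s.length / 2 < s.length := by rw [hlen]; omega
          have htake : (s.take (s.length / 2)).length ≤ k := by
            simp only [List.length_take]
            have := hlen ▸ h; omega
          have hdrop : (s.drop (s.length / 2)).length ≤ k := by
            simp only [List.length_drop]
            have := hlen ▸ h; omega
          rw [ih _ htake, ih _ hdrop]
          have hsplit : s.take (s.length / 2) ++ s.drop (s.length / 2) = s :=
            List.take_append_drop _ _
          simp only [Prod.mk.injEq]
          refine ⟨?_, ?_⟩
          · -- distances component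
            conv_rhs => rw [← hsplit]
            rw [pvFA_append, pv_shift (s.drop (s.length / 2)) (0 + pvW (s.take (s.length / 2)))]
            simp
          · -- width component
            conv_rhs => rw [← hsplit]
            rw [pvW_append]

-- ===== VERDICT (by name: the statement is the Claim_ definition above) =====
theorem get_distances_spec : Claim_equal_get_distances := by
  intro xs _
  show get_distances xs = get_distances_alt xs
  simp only [get_distances, get_distances_alt, pvA_fold, List.nil_append,
    pv_main xs.length xs le_rfl]
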